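-- pv_equiv track=rewrite | github.com/OrgPele/envctl | python/envctl_engine/ui/dashboard/orchestrator.py | _restart_service_types_from_service_names
-- ===== SOURCE A (Python) =====
-- def _restart_service_types_from_service_names(service_names: list[str]) -> list[str]:
--     types: list[str] = []
--     seen: set[str] = set()
--     for name in service_names:
--         normalized = str(name).strip().lower()
--         service_type = ""
--         if normalized.endswith(" backend"):
--             service_type = "backend"
--         elif normalized.endswith(" frontend"):
--             service_type = "frontend"
--         if service_type and service_type not in seen:
--             seen.add(service_type)
--             types.append(service_type)
--     return types
-- ===== SOURCE B (Python) =====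
-- def _restart_service_types_from_service_names(service_names: list[str]) -> list[str]:
--     normalized = [str(name).strip().lower() for name in service_names]
--     found: list[tuple[int, str]] = []
--     for suffix, service_type in ((" backend", "backend"), (" frontend", "frontend")):
--         idx = next((i for i, m in enumerate(normalized) if m.endswith(suffix)), None)
--         if idx is not None:
--             found.append((idx, service_type))
--     found.sort(key=lambda p: p[0])
--     return [service_type for _, service_type in found]
-- ===== Notes on version B (the rewrite author's own statement) =====
-- stated objective: alternative
-- what changed: Replaces A's single streaming pass with a seen-set dedup by a per-type search: normalize all names once, find each type's first-occurrence index, then order the found types by that index.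
import Mathlib
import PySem

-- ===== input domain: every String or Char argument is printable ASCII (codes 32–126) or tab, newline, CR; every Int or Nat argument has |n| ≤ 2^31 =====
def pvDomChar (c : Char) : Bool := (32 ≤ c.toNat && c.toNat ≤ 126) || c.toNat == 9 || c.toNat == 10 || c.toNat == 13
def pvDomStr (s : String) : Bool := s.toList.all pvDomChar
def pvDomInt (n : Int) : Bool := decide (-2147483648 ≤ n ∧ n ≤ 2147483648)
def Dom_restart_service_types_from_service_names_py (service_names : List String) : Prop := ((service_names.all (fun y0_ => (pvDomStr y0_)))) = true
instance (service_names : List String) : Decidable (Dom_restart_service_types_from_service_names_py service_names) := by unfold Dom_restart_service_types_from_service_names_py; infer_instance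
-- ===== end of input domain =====

-- B replaces A's single streaming dedup-with-set pass by normalizing once, finding each type's
-- first-occurrence index, and sorting the found types by that index (objective: alternative).

-- shared pure expressions of both Python sources: str(name).strip().lower() and the suffix tests
def pvNorm (name : String) : String := PySem.Str.lower (PySem.Str.strip name)
def pvPb (m : String) : Bool := PySem.Str.endswith m " backend"
def pvPf (m : String) : Bool := PySem.Str.endswith m " frontend"

-- ===== PORT A =====
-- loop body of A's for-loop (state = (types, seen))
def pvStepA (st : List String × PySem.Set String) (name : String) : List String × PySem.Set String :=
  let normalized := pvNorm name
  let service_type : String :=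
    if pvPb normalized then "backend"
    else if pvPf normalized then "frontend"
    else ""
  if service_type != "" && !(PySem.Set.contains st.2 service_type) then
    (st.1 ++ [service_type], PySem.Set.add st.2 service_type)
  else st

def restart_service_types_from_service_names_py (service_names : List String) : List String :=
  (service_names.foldl pvStepA ([], PySem.Set.empty)).1

-- ===== PORT B =====
def restart_service_types_from_service_names_py_alt (service_names : List String) : List String :=
  let normalized := service_names.map pvNorm
  let found := [(" backend", "backend"), (" frontend", "frontend")].foldl
    (fun (acc : List (Nat × String)) st =>
      match normalized.findIdx? (fun m => PySem.Str.endswith m st.1) with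
      | some i => acc ++ [(i, st.2)]
      | none => acc) []
  (PySem.List.sorted found (fun p => p.1)).map (fun p => p.2)

-- ===== PRECONDITION & SPEC =====
def Spec_restart_service_types_from_service_names_py (service_names : List String) (out : List String) : Prop := out = restart_service_types_from_service_names_py_alt service_names
instance (service_names : List String) (out : List String) : Decidable (Spec_restart_service_types_from_service_names_py service_names out) := by unfold Spec_restart_service_types_from_service_names_py; infer_instance

-- ===== CLAIM (what is proved, stated in full; the proofs are below) =====
def Claim_equal_restart_service_types_from_service_names_py : Prop := ∀ (service_names : List String), Dom_restart_service_types_from_service_names_py service_names → Spec_restart_service_types_from_service_names_py service_names (restart_service_types_from_service_names_py service_names)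

-- ===== LEMMAS AND PROOFS =====

-- common value both sides are reduced to, as a function of the two first-occurrence indices
def pvRhs (ts : List String) (ob of' : Option Nat) : List String :=
  match ob, of' with
  | none, none => ts
  | some _, none => ts ++ ["backend"]
  | none, some _ => ts ++ ["frontend"]
  | some i, some j => if j < i then ts ++ ["frontend", "backend"] else ts ++ ["backend", "frontend"]

-- a string cannot end with both " backend" and " frontend"
lemma pv_excl (m : String) (hb : pvPb m = true) : pvPf m = false := by
  by_contra h
  have hf : pvPf m = true := by revert h; cases pvPf m <;> simp
  have hb' : (" backend".toList) <:+ m.toList := (PySem.Chars.endswith_iff _ _).mp hb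
  have hf' : (" frontend".toList) <:+ m.toList := (PySem.Chars.endswith_iff _ _).mp hf
  rcases List.suffix_or_suffix_of_suffix hb' hf' with h1 | h1
  · exact absurd h1 (by decide)
  · exact absurd h1 (by decide)

lemma pv_both_seen (l : List String) (ts : List String) (seen : PySem.Set String)
    (hb : "backend" ∈ seen) (hf : "frontend" ∈ seen) :
    (l.foldl pvStepA (ts, seen)).1 = ts := by
  induction l generalizing ts seen with
  | nil => rfl
  | cons n l ih =>
    simp only [List.foldl_cons, pvStepA]
    by_cases h1 : pvPb (pvNorm n) = true
    · simp [h1, hb]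
      exact ih _ _ hb hf
    · by_cases h2 : pvPf (pvNorm n) = true
      · simp [h1, h2, hf]
        exact ih _ _ hb hf
      · simp [h1, h2]
        exact ih _ _ hb hf

lemma pv_b_seen (l : List String) (ts : List String) (seen : PySem.Set String)
    (hb : "backend" ∈ seen) (hf : "frontend" ∉ seen) :
    (l.foldl pvStepA (ts, seen)).1 =
      match l.findIdx? (pvPf ∘ pvNorm) with
      | some _ => ts ++ ["frontend"]
      | none => ts := by
  induction l generalizing ts with
  | nil => rfl
  | cons n l ih =>
    simp only [List.foldl_cons, pvStepA, List.findIdx?_cons]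
    by_cases h1 : pvPb (pvNorm n) = true
    · have hnf := pv_excl _ h1
      cases hx : l.findIdx? (pvPf ∘ pvNorm) <;>
        simp [Function.comp, h1, hnf, hb, ih ts, hx]
    · by_cases h2 : pvPf (pvNorm n) = true
      · simp [Function.comp, h1, h2, hf]
        exact pv_both_seen l _ _ (List.mem_append_left _ hb) (by simp)
      · cases hx : l.findIdx? (pvPf ∘ pvNorm) <;>
          simp [Function.comp, h1, h2, ih ts, hx]

lemma pv_f_seen (l : List String) (ts : List String) (seen : PySem.Set String)
    (hb : "backend" ∉ seen) (hf : "frontend" ∈ seen) :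
    (l.foldl pvStepA (ts, seen)).1 =
      match l.findIdx? (pvPb ∘ pvNorm) with
      | some _ => ts ++ ["backend"]
      | none => ts := by
  induction l generalizing ts with
  | nil => rfl
  | cons n l ih =>
    simp only [List.foldl_cons, pvStepA, List.findIdx?_cons]
    by_cases h1 : pvPb (pvNorm n) = true
    · simp [Function.comp, h1, hb]
      exact pv_both_seen l _ _ (by simp) (List.mem_append_left _ hf)
    · by_cases h2 : pvPf (pvNorm n) = true
      · cases hx : l.findIdx? (pvPb ∘ pvNorm) <;>
          simp [Function.comp, h1, h2, hf, ih ts, hx]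
      · cases hx : l.findIdx? (pvPb ∘ pvNorm) <;>
          simp [Function.comp, h1, h2, ih ts, hx]

lemma pv_a_eq_rhs (l : List String) :
    (l.foldl pvStepA ([], PySem.Set.empty)).1 =
      pvRhs [] (l.findIdx? (pvPb ∘ pvNorm)) (l.findIdx? (pvPf ∘ pvNorm)) := by
  induction l with
  | nil => rfl
  | cons n l ih =>
    simp only [List.foldl_cons, pvStepA, List.findIdx?_cons]
    by_cases h1 : pvPb (pvNorm n) = true
    · have hnf := pv_excl _ h1
      have hrec := pv_b_seen l ["backend"] ["backend"] (by simp) (by simp)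
      cases hx : l.findIdx? (pvPf ∘ pvNorm) <;>
        simp_all [Function.comp, PySem.Set.empty, PySem.Set.contains, PySem.Set.add, pvRhs]
    · by_cases h2 : pvPf (pvNorm n) = true
      · have hrec := pv_f_seen l ["frontend"] ["frontend"] (by simp) (by simp)
        cases hx : l.findIdx? (pvPb ∘ pvNorm) <;>
          simp_all [Function.comp, PySem.Set.empty, PySem.Set.contains, PySem.Set.add, pvRhs]
      · cases hxb : l.findIdx? (pvPb ∘ pvNorm) <;> cases hxf : l.findIdx? (pvPf ∘ pvNorm) <;>
          simp_all [Function.comp, pvRhs]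

lemma pv_sorted_two (i j : Nat) (a b : String) :
    PySem.List.sorted [(i, a), (j, b)] (fun p => p.1) =
      if j < i then [(j, b), (i, a)] else [(i, a), (j, b)] := by
  simp only [PySem.List.sorted, List.foldl_cons, List.foldl_nil, PySem.List.insertBy]
  split_ifs with h <;> simp_all

lemma pv_alt_eq_rhs (l : List String) :
    restart_service_types_from_service_names_py_alt l =
      pvRhs [] (l.findIdx? (pvPb ∘ pvNorm)) (l.findIdx? (pvPf ∘ pvNorm)) := by
  unfold restart_service_types_from_service_names_py_alt
  simp only [List.foldl_cons, List.foldl_nil]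
  have hb : (fun m => PySem.Str.endswith m " backend") = pvPb := rfl
  have hf : (fun m => PySem.Str.endswith m " frontend") = pvPf := rfl
  rw [hb, hf, List.findIdx?_map, List.findIdx?_map]
  cases hob : l.findIdx? (pvPb ∘ pvNorm) <;> cases hof : l.findIdx? (pvPf ∘ pvNorm)
  · simp [pvRhs, PySem.List.sorted]
  · simp [pvRhs, PySem.List.sorted, PySem.List.insertBy]
  · simp [pvRhs, PySem.List.sorted, PySem.List.insertBy]
  · simp [pv_sorted_two, apply_ite, pvRhs]

-- ===== VERDICT (by name: the statement is the Claim_ definition above) =====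
theorem restart_service_types_from_service_names_py_spec : Claim_equal_restart_service_types_from_service_names_py := by
  intro l _
  unfold Spec_restart_service_types_from_service_names_py
  rw [pv_alt_eq_rhs]
  exact pv_a_eq_rhs l
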